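-- pv_equiv track=rewrite | github.com/zonkisa/leezyer | bygroup/search/permutation/LC784.py | toggle
-- ===== SOURCE A (Python) =====
-- def toggle(S, i):
-- 	cp = ""
-- 	for j in range(len(S)):
-- 		c = S[j]
-- 		if i == j:
-- 			c = chr(ord(c) ^ (1 << 5))
-- 		cp += c
-- 	S = cp
-- 	return S
-- ===== SOURCE B (Python) =====
-- def toggle(S, i):
--     if 0 <= i < len(S):
--         return S[:i] + chr(ord(S[i]) ^ (1 << 5)) + S[i + 1:]
--     return S
-- ===== Notes on version B (the rewrite author's own statement) =====
-- stated objective: simpler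
-- what changed: B replaces A's character-by-character loop (with an i == j test and repeated string concatenation inside) by a single range check plus slice concatenation (prefix + toggled char + suffix), returning S unchanged when i is out of range.
import Mathlib
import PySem

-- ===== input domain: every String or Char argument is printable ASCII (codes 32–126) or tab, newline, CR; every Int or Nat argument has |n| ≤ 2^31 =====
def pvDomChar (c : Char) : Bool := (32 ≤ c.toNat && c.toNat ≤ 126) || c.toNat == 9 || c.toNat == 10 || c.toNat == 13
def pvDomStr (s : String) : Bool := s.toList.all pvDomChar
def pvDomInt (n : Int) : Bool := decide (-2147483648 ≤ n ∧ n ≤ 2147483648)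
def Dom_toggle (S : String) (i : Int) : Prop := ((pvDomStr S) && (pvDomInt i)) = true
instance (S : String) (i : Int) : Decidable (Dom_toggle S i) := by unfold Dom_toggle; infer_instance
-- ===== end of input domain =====

-- B replaces A's per-character loop (with an `i == j` test inside) by one range check and
-- slice concatenation; same return value on all inputs, no side effects either way.

-- chr(ord(c) ^ (1 << 5))
def togChar (c : Char) : Char := Char.ofNat (c.toNat ^^^ 32)

-- ===== PORT A =====
def toggle (S : String) (i : Int) : String :=
  let L := S.toList
  let cp : List Char :=
    (PySem.List.pyRange 0 (L.length : Int) 1).foldl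
      (fun cp j =>
        let c := PySem.List.pyGetD L j ' '
        let c := if i = j then togChar c else c
        cp ++ [c]) []
  String.ofList cp

-- ===== PORT B =====
def toggle_alt (S : String) (i : Int) : String :=
  let L := S.toList
  if 0 ≤ i ∧ i < (L.length : Int) then
    String.ofList (PySem.List.slice L none (some i)
      ++ [togChar (PySem.List.pyGetD L i ' ')]
      ++ PySem.List.slice L (some (i + 1)) none)
  else S

-- ===== PRECONDITION & SPEC =====
def Spec_toggle (S : String) (i : Int) (out : String) : Prop := out = toggle_alt S i
instance (S : String) (i : Int) (out : String) : Decidable (Spec_toggle S i out) := by unfold Spec_toggle; infer_instance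

-- ===== CLAIM (what is proved, stated in full; the proofs are below) =====
def Claim_equal_toggle : Prop := ∀ (S : String) (i : Int), Dom_toggle S i → Spec_toggle S i (toggle S i)

-- ===== LEMMAS AND PROOFS =====

-- A's loop body, after rewriting the foldl as a map over range
def aBody (L : List Char) (i : Int) (k : Nat) : Char :=
  if i = (k : Int) then togChar (L.getD k ' ') else L.getD k ' '

lemma toggle_as_map (S : String) (i : Int) :
    toggle S i = String.ofList ((List.range S.toList.length).map (aBody S.toList i)) := by
  unfold toggle aBody
  simp only [PySem.List.foldl_append_singleton_eq_map, PySem.List.pyRange_one, List.map_map,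
    List.nil_append]
  refine congrArg _ (List.map_congr_left ?_)
  intro k hk
  simp [Function.comp, List.getD]

lemma map_body_out (L : List Char) (i : Int) (h : ¬ (0 ≤ i ∧ i < (L.length : Int))) :
    (List.range L.length).map (aBody L i) = L := by
  apply List.ext_getElem (by simp)
  intro k h1 h2
  simp only [List.getElem_map, List.getElem_range, aBody]
  rw [if_neg (by simp at h1 ⊢; omega)]
  simp [List.getD, h2]

lemma map_body_in (L : List Char) (i : Int) (h0 : 0 ≤ i) (h1 : i < (L.length : Int)) :
    (List.range L.length).map (aBody L i) =
      L.take i.toNat ++ [togChar (L.getD i.toNat ' ')] ++ L.drop (i.toNat + 1) := by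
  have hn : i.toNat < L.length := by omega
  apply List.ext_getElem (by simp [Nat.min_eq_left hn.le] <;> omega)
  intro k hk1 hk2
  simp only [List.getElem_map, List.getElem_range, aBody]
  simp only [List.length_map, List.length_range] at hk1
  by_cases hki : (k : Int) = i
  · have : k = i.toNat := by omega
    subst this
    rw [if_pos hki.symm]
    rw [List.getElem_append_left (by simp [Nat.min_eq_left hn.le] <;> omega),
      List.getElem_append_right (by simp [Nat.min_eq_left hn.le] <;> omega)]
    simp [List.getD, hn, Nat.min_eq_left hn.le]
  · rw [if_neg (fun he => hki (by omega))]
    rcases lt_or_ge k i.toNat with hlt | hge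
    · rw [List.getElem_append_left (by simp [Nat.min_eq_left hn.le] <;> omega),
        List.getElem_append_left (by simp [Nat.min_eq_left hn.le] <;> omega), List.getElem_take]
      simp [List.getD, hk1]
    · have hgt : i.toNat < k := by omega
      rw [List.getElem_append_right (by simp [Nat.min_eq_left hn.le] <;> omega), List.getElem_drop]
      simp only [List.length_append, List.length_take, List.length_cons, List.length_nil,
        min_eq_left hn.le]
      simp only [Nat.zero_add]
      have : i.toNat + 1 + (k - (i.toNat + 1)) = k := by omega
      simp [List.getD, hk1, this]

-- ===== VERDICT (by name: the statement is the Claim_ definition above) =====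
theorem toggle_spec : Claim_equal_toggle := by
  intro S i _
  show toggle S i = toggle_alt S i
  rw [toggle_as_map]
  unfold toggle_alt
  by_cases h : 0 ≤ i ∧ i < ((S.toList.length : Int))
  · simp only [h, if_pos, and_self]
    rw [map_body_in S.toList i h.1 h.2]
    have ht : (i + 1).toNat = i.toNat + 1 := by omega
    rw [PySem.List.slice_to S.toList h.1, PySem.List.slice_from S.toList (by omega : (0:Int) ≤ i + 1), ht,
      PySem.List.pyGetD_eq_getElem S.toList ' ' h.1 h.2]
    simp [List.getD, List.getElem?_eq_getElem (by omega : i.toNat < S.toList.length)]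
  · rw [if_neg h, map_body_out S.toList i h]
    simp
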